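-- pv_equiv track=rewrite | github.com/EnochCHIU-polyu/COMP5566_project_26022026 | phase1_data_pipeline/contract_chunker.py | extract_pragma_and_imports
-- ===== SOURCE A (Python) =====
-- def extract_pragma_and_imports(source_code: str) -> str:
--     """Extract pragma statement and import declarations."""
--     lines = source_code.splitlines()
--     header_lines = []
--     for line in lines:
--         stripped = line.strip()
--         if stripped.startswith('pragma ') or stripped.startswith('import '):
--             header_lines.append(line)
--         elif header_lines and stripped == '':
--             header_lines.append(line)
--     return '\n'.join(header_lines)
-- ===== SOURCE B (Python) =====
-- def _is_header(line):
--     stripped = line.strip()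
--     return stripped.startswith('pragma ') or stripped.startswith('import ')
--
--
-- def extract_pragma_and_imports(source_code: str) -> str:
--     """Extract pragma statement and import declarations."""
--     lines = source_code.splitlines()
--     # skip everything before the first pragma/import line
--     i = 0
--     n = len(lines)
--     while i < n and not _is_header(lines[i]):
--         i += 1
--     # from there on, keep header lines and blank lines (stateless filter)
--     return '\n'.join(l for l in lines[i:] if _is_header(l) or l.strip() == '')
-- ===== Notes on version B (the rewrite author's own statement) =====
-- stated objective: simpler
-- what changed: Replaces A's stateful accumulator loop (flag = header_lines non-empty) by drop-prefix-before-first-header followed by a stateless filter keeping header or blank lines.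
import Mathlib
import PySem

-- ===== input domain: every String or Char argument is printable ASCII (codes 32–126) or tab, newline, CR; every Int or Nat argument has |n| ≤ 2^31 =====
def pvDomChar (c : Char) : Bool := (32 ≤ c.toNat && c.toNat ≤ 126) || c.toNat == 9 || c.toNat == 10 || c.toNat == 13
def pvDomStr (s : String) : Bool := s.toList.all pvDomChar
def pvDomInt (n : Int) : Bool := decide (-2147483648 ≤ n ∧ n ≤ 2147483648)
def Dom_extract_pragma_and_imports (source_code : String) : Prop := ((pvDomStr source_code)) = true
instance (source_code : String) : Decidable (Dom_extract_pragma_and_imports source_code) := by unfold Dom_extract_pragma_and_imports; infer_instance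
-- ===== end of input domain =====

-- B replaces A's stateful accumulator loop by dropping the prefix before the
-- first pragma/import line and then stateless-filtering header/blank lines (simpler decomposition).


-- ===== PORT A =====
def extract_pragma_and_imports (source_code : String) : String :=
  let lines := PySem.Str.splitlines source_code
  let header_lines := lines.foldl (fun header_lines line =>
    let stripped := PySem.Str.strip line
    if PySem.Str.startswith stripped "pragma " || PySem.Str.startswith stripped "import " then
      header_lines ++ [line]
    else if !header_lines.isEmpty && stripped == "" then
      header_lines ++ [line]
    else
      header_lines) []
  PySem.Str.join "\n" header_lines

-- ===== PORT B =====
def pvIsHeader (line : String) : Bool :=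
  let stripped := PySem.Str.strip line
  PySem.Str.startswith stripped "pragma " || PySem.Str.startswith stripped "import "

def extract_pragma_and_imports_alt (source_code : String) : String :=
  let lines := PySem.Str.splitlines source_code
  let rest := lines.dropWhile (fun l => !pvIsHeader l)
  PySem.Str.join "\n" (rest.filter (fun l => pvIsHeader l || PySem.Str.strip l == ""))

-- ===== PRECONDITION & SPEC =====
def Spec_extract_pragma_and_imports (source_code : String) (out : String) : Prop := out = extract_pragma_and_imports_alt source_code
instance (source_code : String) (out : String) : Decidable (Spec_extract_pragma_and_imports source_code out) := by unfold Spec_extract_pragma_and_imports; infer_instance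

-- ===== CLAIM (what is proved, stated in full; the proofs are below) =====
def Claim_equal_extract_pragma_and_imports : Prop := ∀ (source_code : String), Dom_extract_pragma_and_imports source_code → Spec_extract_pragma_and_imports source_code (extract_pragma_and_imports source_code)

-- ===== LEMMAS AND PROOFS =====

-- A's loop step, named for the lemmas (definitionally A's inline lambda)
def pvStepA (acc : List String) (line : String) : List String :=
  let stripped := PySem.Str.strip line
  if PySem.Str.startswith stripped "pragma " || PySem.Str.startswith stripped "import " then
    acc ++ [line]
  else if !acc.isEmpty && stripped == "" then
    acc ++ [line]
  else
    acc

def pvKeep (l : String) : Bool := pvIsHeader l || PySem.Str.strip l == ""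

-- once the accumulator is non-empty, A's loop is a stateless filter
theorem pvFoldA_nonempty (ls : List String) : ∀ acc : List String, acc ≠ [] →
    ls.foldl pvStepA acc = acc ++ ls.filter pvKeep := by
  induction ls with
  | nil => intro acc _; simp
  | cons l ls ih =>
    intro acc hacc
    simp only [List.foldl_cons, List.filter_cons]
    by_cases h1 : (PySem.Str.startswith (PySem.Str.strip l) "pragma "
        || PySem.Str.startswith (PySem.Str.strip l) "import ") = true
    · rw [show pvStepA acc l = acc ++ [l] by simp only [pvStepA, h1, if_true],
        ih (acc ++ [l]) (by simp)]
      simp only [pvKeep, pvIsHeader, h1, Bool.true_or, if_true, List.append_assoc,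
        List.singleton_append]
    · rw [Bool.not_eq_true] at h1
      by_cases h2 : (PySem.Str.strip l == "") = true
      · rw [show pvStepA acc l = acc ++ [l] by
          simp only [pvStepA, h1, h2, List.isEmpty_eq_false_iff.mpr hacc, Bool.not_false,
            Bool.true_and, Bool.false_eq_true, if_false, if_true],
          ih (acc ++ [l]) (by simp)]
        simp only [pvKeep, pvIsHeader, h1, h2, Bool.false_or, if_true, List.append_assoc,
          List.singleton_append]
      · rw [Bool.not_eq_true] at h2
        rw [show pvStepA acc l = acc by
          simp only [pvStepA, h1, h2, Bool.and_false, Bool.false_eq_true, if_false], ih acc hacc]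
        simp only [pvKeep, pvIsHeader, h1, h2, Bool.false_or, Bool.false_eq_true, if_false]

-- from the empty accumulator, A's loop is dropWhile-then-filter
theorem pvFoldA_nil (ls : List String) :
    ls.foldl pvStepA [] = (ls.dropWhile (fun l => !pvIsHeader l)).filter pvKeep := by
  induction ls with
  | nil => simp
  | cons l ls ih =>
    simp only [List.foldl_cons, List.dropWhile_cons]
    by_cases h1 : pvIsHeader l = true
    · have hs : pvStepA [] l = [l] := by
        simp only [pvIsHeader] at h1
        simp only [pvStepA, h1, if_true, List.nil_append]
      rw [hs, pvFoldA_nonempty ls [l] (by simp), h1]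
      simp only [Bool.not_true, Bool.false_eq_true, if_false, List.filter_cons, pvKeep, h1,
        Bool.true_or, if_true, List.singleton_append]
    · rw [Bool.not_eq_true] at h1
      have hs : pvStepA [] l = [] := by
        simp only [pvIsHeader] at h1
        simp only [pvStepA, h1, List.isEmpty_nil, Bool.not_true, Bool.false_and,
          Bool.false_eq_true, if_false]
      rw [hs, h1]
      simp only [Bool.not_false, if_true, ih]

-- ===== VERDICT (by name: the statement is the Claim_ definition above) =====
theorem extract_pragma_and_imports_spec : Claim_equal_extract_pragma_and_imports := by
  intro source_code _
  show extract_pragma_and_imports source_code = extract_pragma_and_imports_alt source_code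
  show PySem.Str.join "\n" ((PySem.Str.splitlines source_code).foldl pvStepA [])
    = PySem.Str.join "\n"
        (((PySem.Str.splitlines source_code).dropWhile (fun l => !pvIsHeader l)).filter pvKeep)
  rw [pvFoldA_nil]
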